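-- pv_equiv track=rewrite | github.com/kylecui/threat-detection-system | services/tire/enrichers/service_catalog_enricher.py | _count_keyword_matches
-- ===== SOURCE A (Python) =====
-- from typing import List, Dict, Any, Optional
--
-- def _count_keyword_matches(strings: List[str], keywords: List[str]) -> int:
--     """Count how many strings contain any of the keywords."""
--     if not strings or not keywords:
--         return 0
--
--     count = 0
--     for string in strings:
--         if string:
--             string_lower = string.lower()
--             if any(keyword.lower() in string_lower for keyword in keywords):
--                 count += 1
--
--     return count
-- ===== SOURCE B (Python) =====
-- def _count_keyword_matches(strings, keywords):
--     """Count how many strings contain any of the keywords (loop order swapped: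
--     lowercase each keyword once, mark matched strings, count the marks)."""
--     lows = [k.lower() for k in keywords]
--     matched = [False] * len(strings)
--     for k in lows:
--         for i, s in enumerate(strings):
--             if not matched[i] and s and k in s.lower():
--                 matched[i] = True
--     return sum(matched)
-- ===== Notes on version B (the rewrite author's own statement) =====
-- stated objective: alternative
-- what changed: Swapped loop nesting: B lowercases each keyword once, then for each keyword marks the strings containing it in a boolean array and returns the number of marks, instead of A's per-string scan that re-lowercases every keyword for every string.
import Mathlib
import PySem

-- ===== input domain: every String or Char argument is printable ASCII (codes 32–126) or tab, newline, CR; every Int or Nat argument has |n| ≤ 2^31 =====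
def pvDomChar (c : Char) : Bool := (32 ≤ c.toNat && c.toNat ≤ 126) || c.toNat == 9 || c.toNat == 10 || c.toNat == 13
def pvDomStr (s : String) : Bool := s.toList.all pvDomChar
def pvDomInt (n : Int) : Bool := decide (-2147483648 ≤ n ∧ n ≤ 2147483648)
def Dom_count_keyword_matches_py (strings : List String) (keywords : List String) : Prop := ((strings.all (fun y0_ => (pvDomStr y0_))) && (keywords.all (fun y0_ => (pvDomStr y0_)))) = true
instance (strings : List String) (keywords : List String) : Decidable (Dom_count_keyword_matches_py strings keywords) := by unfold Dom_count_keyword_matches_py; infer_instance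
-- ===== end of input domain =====

-- B swaps the loop nesting: it lowercases each keyword once, marks matched strings per keyword
-- in a boolean list, and counts the marks (objective: alternative structure; same results).

-- ===== PORT A =====
-- for string in strings: if string: if any(keyword.lower() in string.lower() for keyword in keywords): count += 1
def count_keyword_matches_py (strings : List String) (keywords : List String) : Int :=
  if strings = [] ∨ keywords = [] then 0
  else
    strings.foldl (fun count string =>
      if string.toList ≠ [] then
        let string_lower := PySem.Str.lower string
        if keywords.any (fun keyword => PySem.Str.isIn (PySem.Str.lower keyword) string_lower) then
          count + 1
        else count
      else count) 0

-- ===== PORT B =====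
-- one marking pass of B's inner 'for i, s in enumerate(strings)' loop for one lowercased keyword
def pvMarkPass (strings : List String) (matched : List Bool) (k : String) : List Bool :=
  (matched.zip strings).map (fun p =>
    p.1 || (decide (p.2.toList ≠ []) && PySem.Str.isIn k (PySem.Str.lower p.2)))

def count_keyword_matches_py_alt (strings : List String) (keywords : List String) : Int :=
  -- lows = [k.lower() for k in keywords]; matched = [False]*len(strings); the loop; sum(matched)
  ((((keywords.map (fun k => PySem.Str.lower k)).foldl (pvMarkPass strings)
      (strings.map (fun _ => false))).countP (fun m => m)) : Int)

-- ===== PRECONDITION & SPEC =====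
def Spec_count_keyword_matches_py (strings : List String) (keywords : List String) (out : Int) : Prop := out = count_keyword_matches_py_alt strings keywords
instance (strings : List String) (keywords : List String) (out : Int) : Decidable (Spec_count_keyword_matches_py strings keywords out) := by unfold Spec_count_keyword_matches_py; infer_instance

-- ===== CLAIM (what is proved, stated in full; the proofs are below) =====
def Claim_equal_count_keyword_matches_py : Prop := ∀ (strings : List String) (keywords : List String), Dom_count_keyword_matches_py strings keywords → Spec_count_keyword_matches_py strings keywords (count_keyword_matches_py strings keywords)

-- ===== LEMMAS AND PROOFS =====

theorem pvZipSelf {α : Type} (f : α → Bool) (xs : List α) :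
    (xs.map f).zip xs = xs.map (fun x => (f x, x)) := by
  induction xs with
  | nil => simp
  | cons a l ih => simp [ih]

-- invariant of B's keyword loop: after processing 'lows', a string is marked iff it was
-- already marked (via f) or it is nonempty and contains one of the processed keywords
theorem pvMark_inv (strings : List String) (lows : List String) (f : String → Bool) :
    lows.foldl (pvMarkPass strings) (strings.map f) =
    strings.map (fun s =>
      f s || (decide (s.toList ≠ []) &&
        lows.any (fun k => PySem.Str.isIn k (PySem.Str.lower s)))) := by
  induction lows generalizing f with
  | nil => simp
  | cons k ks ih =>
    simp only [List.foldl_cons]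
    have hstep : pvMarkPass strings (strings.map f) k =
        strings.map (fun s =>
          f s || (decide (s.toList ≠ []) && PySem.Str.isIn k (PySem.Str.lower s))) := by
      unfold pvMarkPass
      rw [pvZipSelf f strings, List.map_map]
      rfl
    rw [hstep, ih]
    apply List.map_congr_left
    intro s _
    simp only [List.any_cons]
    generalize PySem.Str.isIn k (PySem.Str.lower s) = x
    generalize (ks.any fun kk => PySem.Str.isIn kk (PySem.Str.lower s)) = y
    cases f s <;> cases x <;> cases y <;> simp

-- A's predicate coincides with B's marking condition
theorem pvPred_eq (keywords : List String) (s : String) :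
    (decide (s.toList ≠ []) &&
      (keywords.map (fun k => PySem.Str.lower k)).any
        (fun k => PySem.Str.isIn k (PySem.Str.lower s))) =
    (decide (s.toList ≠ []) &&
      keywords.any (fun keyword => PySem.Str.isIn (PySem.Str.lower keyword) (PySem.Str.lower s))) := by
  rw [List.any_map]
  rfl

-- ===== VERDICT (by name: the statement is the Claim_ definition above) =====
theorem count_keyword_matches_py_spec : Claim_equal_count_keyword_matches_py := by
  intro strings keywords _
  unfold Spec_count_keyword_matches_py count_keyword_matches_py count_keyword_matches_py_alt
  rw [pvMark_inv strings _ (fun _ => false)]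
  simp only [Bool.false_or]
  have hcount : (strings.map (fun s =>
      decide (s.toList ≠ []) &&
        (keywords.map (fun k => PySem.Str.lower k)).any
          (fun k => PySem.Str.isIn k (PySem.Str.lower s)))).countP (fun m => m) =
      strings.countP (fun s =>
        decide (s.toList ≠ []) &&
          keywords.any (fun keyword => PySem.Str.isIn (PySem.Str.lower keyword) (PySem.Str.lower s))) := by
    rw [List.countP_map]
    apply List.countP_congr
    intro s _
    simp only [Function.comp_apply]
    rw [pvPred_eq keywords s]
  rw [hcount]
  by_cases h : strings = [] ∨ keywords = []
  · rcases h with h | h <;> simp [h]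
  · rw [if_neg h]
    rw [PySem.List.foldl_congr_mem strings _
        (fun acc x =>
          if (decide (x.toList ≠ []) &&
              keywords.any fun keyword =>
                PySem.Str.isIn (PySem.Str.lower keyword) (PySem.Str.lower x)) = true then
            acc + 1
          else acc) 0
        (by intro count s _; by_cases hs : s.toList = [] <;> simp [hs]),
      PySem.List.foldl_count_if, zero_add]
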